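-- pv_equiv track=rewrite | github.com/FreedomFrog/pdxcodeguild | python/word_count.py | word_follower
-- ===== SOURCE A (Python) =====
-- def word_follower(string_of_words):
--     list_of_words = string_of_words.split(' ')
--     word_dict = {}
--     for index, word in enumerate(list_of_words):
--         if index < len(list_of_words) - 1:
--             next_word = list_of_words[index + 1]
--         else:
--             break
--         if word == '' or next_word == '':
--             pass
--         elif len(word) > 0:
--             if word not in word_dict:
--                 word_dict[word] = {}
--             if next_word not in word_dict[word]:
--                 word_dict[word][next_word] = 1
--             else:
--                 word_dict[word][next_word] += 1
--     return word_dict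
-- ===== SOURCE B (Python) =====
-- def word_follower(string_of_words):
--     words = string_of_words.split(' ')
--     # pass 1: adjacent pairs, skipping any pair touching an empty token
--     pairs = [(w, n) for w, n in zip(words, words[1:]) if w != '' and n != '']
--     # pass 2: flat count keyed by the pair
--     counts = {}
--     for p in pairs:
--         counts[p] = counts.get(p, 0) + 1
--     # pass 3: reshape the flat counter into the nested dict
--     word_dict = {}
--     for (w, n), c in counts.items():
--         word_dict.setdefault(w, {})[n] = c
--     return word_dict
-- ===== Notes on version B (the rewrite author's own statement) =====
-- stated objective: alternative
-- what changed: Replaces A's single fused enumerate-loop that mutates a nested dict per pair with a three-pass pipeline: build the filtered list of adjacent pairs, count them in one flat dict keyed by the (word, next_word) tuple, then reshape that flat counter into the nested dict in a second pass.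
import Mathlib
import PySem

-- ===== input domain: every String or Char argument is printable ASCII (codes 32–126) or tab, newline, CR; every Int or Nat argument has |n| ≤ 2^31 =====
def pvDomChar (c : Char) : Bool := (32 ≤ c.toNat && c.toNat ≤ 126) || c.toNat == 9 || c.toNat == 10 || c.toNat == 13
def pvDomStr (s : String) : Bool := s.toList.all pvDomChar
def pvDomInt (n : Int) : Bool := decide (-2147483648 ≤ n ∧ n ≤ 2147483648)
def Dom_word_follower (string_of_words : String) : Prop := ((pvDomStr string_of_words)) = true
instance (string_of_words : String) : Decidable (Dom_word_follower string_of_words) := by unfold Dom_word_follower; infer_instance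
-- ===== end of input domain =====

-- B replaces A's single fused update loop by a three-pass pipeline (pair list, flat pair counter,
-- reshape into the nested dict); same nested next-word count dict, no speed claim.


-- ===== PORT A =====
-- string.split(' '): the separator is nonempty, so PySem.Str.split? returns some; .getD [] is exact
-- the body of A's loop for one (word, next_word) pair; d[k] = v is Dict.insert,
-- 'word_dict[word][next_word] += 1' reads the current value and re-assigns it
def wfUpdateA (d : PySem.Dict String (PySem.Dict String Int)) (word next_word : String) :
    PySem.Dict String (PySem.Dict String Int) :=
  if word = "" ∨ next_word = "" then d
  else if 0 < PySem.Str.len word then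
    let d1 := if d.contains word = false then d.insert word PySem.Dict.empty else d
    let inner := d1.getD word PySem.Dict.empty
    if inner.contains next_word = false then
      d1.insert word (inner.insert next_word 1)
    else
      d1.insert word (inner.insert next_word (inner.getD next_word 0 + 1))
  else d

-- A's 'for index, word in enumerate(...)' with 'next_word = list[index+1]' and the break at the
-- last index, transliterated as recursion on the word list (head = word, second = next_word)
def wfLoopA (d : PySem.Dict String (PySem.Dict String Int)) :
    List String → PySem.Dict String (PySem.Dict String Int)
  | [] => d
  | [_] => d
  | w :: nw :: rest => wfLoopA (wfUpdateA d w nw) (nw :: rest)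

def word_follower (string_of_words : String) : List (String × List (String × Int)) :=
  (wfLoopA PySem.Dict.empty ((PySem.Str.split? string_of_words " ").getD [])).items.map
    (fun p => (p.1, p.2.items))

-- ===== PORT B =====
-- pass 1: [(w, n) for w, n in zip(words, words[1:]) if w != '' and n != '']
def wfPairsB (ws : List String) : List (String × String) :=
  (ws.zip (PySem.List.slice ws (some 1) none)).filter
    (fun p => decide (p.1 ≠ "" ∧ p.2 ≠ ""))

-- pass 2: counts[p] = counts.get(p, 0) + 1
def wfCountsB (ps : List (String × String)) : PySem.Dict (String × String) Int :=
  ps.foldl (fun c p => c.insert p (c.getD p 0 + 1)) PySem.Dict.empty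

-- pass 3: word_dict.setdefault(w, {})[n] = c over counts.items()
def wfReshapeB (its : List ((String × String) × Int)) :
    PySem.Dict String (PySem.Dict String Int) :=
  its.foldl (fun d x =>
    let d1 := d.setdefault x.1.1 PySem.Dict.empty
    d1.insert x.1.1 ((d1.getD x.1.1 PySem.Dict.empty).insert x.1.2 x.2)) PySem.Dict.empty

def word_follower_alt (string_of_words : String) : List (String × List (String × Int)) :=
  (wfReshapeB (wfCountsB (wfPairsB ((PySem.Str.split? string_of_words " ").getD []))).items).items.map
    (fun p => (p.1, p.2.items))

-- ===== PRECONDITION & SPEC =====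
def Spec_word_follower (string_of_words : String) (out : List (String × List (String × Int))) : Prop := out = word_follower_alt string_of_words
instance (string_of_words : String) (out : List (String × List (String × Int))) : Decidable (Spec_word_follower string_of_words out) := by unfold Spec_word_follower; infer_instance

-- ===== CLAIM (what is proved, stated in full; the proofs are below) =====
def Claim_equal_word_follower : Prop := ∀ (string_of_words : String), Dom_word_follower string_of_words → Spec_word_follower string_of_words (word_follower string_of_words)

-- ===== LEMMAS AND PROOFS =====

-- the loop body of A on a pair that passes the empty-word test
def nIncr (d : PySem.Dict String (PySem.Dict String Int)) (p : String × String) :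
    PySem.Dict String (PySem.Dict String Int) :=
  let d1 := if d.contains p.1 = false then d.insert p.1 PySem.Dict.empty else d
  let inner := d1.getD p.1 PySem.Dict.empty
  if inner.contains p.2 = false then
    d1.insert p.1 (inner.insert p.2 1)
  else
    d1.insert p.1 (inner.insert p.2 (inner.getD p.2 0 + 1))

def okP (p : String × String) : Bool := decide (p.1 ≠ "" ∧ p.2 ≠ "")

-- canonical value both loops compute, parametrised by the distinct-pair list S (in first-occurrence
-- order) and the value assigned to each pair: outer keys = words of S in order, inner lists = the
-- pairs of S with that word, in order, with their assigned values
def wfShape (S : List (String × String)) (v : String × String → Int) :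
    PySem.Dict String (PySem.Dict String Int) :=
  PySem.Dict.mk ((PySem.Set.ofList (S.map Prod.fst)).map
    (fun w => (w, PySem.Dict.mk ((S.filter (fun k => k.1 == w)).map (fun k => (k.2, v k))))))

def wfCanon (qs : List (String × String)) : PySem.Dict String (PySem.Dict String Int) :=
  wfShape (PySem.Set.ofList qs) (fun k => (qs.count k : Int))

theorem ofList_snoc {α : Type} [BEq α] [LawfulBEq α] (l : List α) (a : α) :
    PySem.Set.ofList (l ++ [a])
      = if a ∈ l then PySem.Set.ofList l else PySem.Set.ofList l ++ [a] := by
  rw [PySem.Set.ofList_eq_foldl, List.foldl_append, List.foldl_cons, List.foldl_nil,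
    ← PySem.Set.ofList_eq_foldl]
  unfold PySem.Set.add
  by_cases h : a ∈ l
  · simp [PySem.Set.contains, h, PySem.Set.mem_ofList]
  · simp [PySem.Set.contains, h, PySem.Set.mem_ofList]

theorem filter_fst_nil (S : List (String × String)) (w : String)
    (h : w ∉ S.map Prod.fst) : S.filter (fun k => k.1 == w) = [] := by
  rw [List.filter_eq_nil_iff]
  intro k hk
  simp only [beq_iff_eq]
  intro he
  exact h (List.mem_map.mpr ⟨k, hk, he⟩)

theorem keys_shape (S : List (String × String)) (v : String × String → Int) :
    (wfShape S v).keys = PySem.Set.ofList (S.map Prod.fst) := by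
  simp only [wfShape, PySem.Dict.keys_mk, List.map_map]
  exact List.map_id _

theorem contains_shape (S : List (String × String)) (v : String × String → Int) (w : String) :
    (wfShape S v).contains w = decide (w ∈ S.map Prod.fst) := by
  rw [PySem.Dict.contains_eq_decide_mem_keys, keys_shape]
  simp [PySem.Set.mem_ofList]

theorem getD_shape (S : List (String × String)) (v : String × String → Int) {w : String}
    (hw : w ∈ S.map Prod.fst) (d0 : PySem.Dict String Int) :
    (wfShape S v).getD w d0
      = PySem.Dict.mk ((S.filter (fun k => k.1 == w)).map (fun k => (k.2, v k))) := by
  apply PySem.Dict.getD_of_mem_items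
  · show _ ∈ List.map _ _
    exact List.mem_map.mpr ⟨w, by simpa [PySem.Set.mem_ofList] using hw, rfl⟩
  · rw [keys_shape]; exact PySem.Set.nodup_ofList _

theorem contains_inner (S : List (String × String)) (v : String × String → Int) (w n : String) :
    (PySem.Dict.mk ((S.filter (fun k => k.1 == w)).map (fun k => (k.2, v k)))).contains n
      = decide ((w, n) ∈ S) := by
  rw [PySem.Dict.contains_eq_decide_mem_keys, PySem.Dict.keys_mk]
  simp only [List.map_map, decide_eq_decide]
  constructor
  · intro h
    obtain ⟨k, hk, he⟩ := List.mem_map.mp h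
    obtain ⟨hkS, hkw⟩ := List.mem_filter.mp hk
    have : k = (w, n) := by
      obtain ⟨k1, k2⟩ := k
      simp only [beq_iff_eq] at hkw
      simp only [Function.comp] at he
      simp_all
    exact this ▸ hkS
  · intro h
    exact List.mem_map.mpr ⟨(w, n), List.mem_filter.mpr ⟨h, by simp⟩, rfl⟩

theorem nodup_inner_keys (S : List (String × String)) (w : String) (hnd : S.Nodup) :
    ((S.filter (fun k => k.1 == w)).map Prod.snd).Nodup := by
  apply List.Nodup.map_on
  · intro k hk k' hk' he
    obtain ⟨_, hkw⟩ := List.mem_filter.mp hk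
    obtain ⟨_, hkw'⟩ := List.mem_filter.mp hk'
    obtain ⟨k1, k2⟩ := k; obtain ⟨k1', k2'⟩ := k'
    simp only [beq_iff_eq] at hkw hkw'
    simp_all
  · exact hnd.filter _

theorem getD_inner (S : List (String × String)) (v : String × String → Int)
    {p : String × String} (hp : p ∈ S) (hnd : S.Nodup) (d0 : Int) :
    (PySem.Dict.mk ((S.filter (fun k => k.1 == p.1)).map (fun k => (k.2, v k)))).getD p.2 d0
      = v p := by
  apply PySem.Dict.getD_of_mem_items
  · show _ ∈ List.map _ _
    exact List.mem_map.mpr ⟨p, List.mem_filter.mpr ⟨hp, by simp⟩, rfl⟩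
  · rw [PySem.Dict.keys_mk]
    simpa [List.map_map, Function.comp] using nodup_inner_keys S p.1 hnd

theorem empty_insert (n : String) (c : Int) :
    (PySem.Dict.empty : PySem.Dict String Int).insert n c = PySem.Dict.mk [(n, c)] := by
  apply PySem.Dict.ext
  rw [PySem.Dict.items_insert_of_not_contains _ _ (PySem.Dict.contains_empty n)]
  rfl

theorem map_entry_replace (W : List String) (F G : String → PySem.Dict String Int)
    (w : String) (X : PySem.Dict String Int)
    (hne : ∀ w' ∈ W, w' ≠ w → F w' = G w') (heq : w ∈ W → G w = X) :
    (W.map (fun w' => (w', F w'))).map (fun q => if q.1 == w then (w, X) else q)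
      = W.map (fun w' => (w', G w')) := by
  rw [List.map_map]
  apply List.map_congr_left
  intro w' hw'
  by_cases h : w' = w
  · subst h
    simp [heq hw']
  · simp [Function.comp, h, hne w' hw' h]

theorem filtermap_congr (S : List (String × String)) (v v' : String × String → Int)
    (w : String) (h : ∀ k ∈ S.filter (fun k => k.1 == w), v' k = v k) :
    (S.filter (fun k => k.1 == w)).map (fun k => (k.2, v' k))
      = (S.filter (fun k => k.1 == w)).map (fun k => (k.2, v k)) :=
  List.map_congr_left fun k hk => by rw [h k hk]

theorem filter_snoc_ne (S : List (String × String)) (p : String × String)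
    (w' : String) (h : p.1 ≠ w') :
    (S ++ [p]).filter (fun k => k.1 == w') = S.filter (fun k => k.1 == w') := by
  rw [List.filter_append]
  simp [h]

theorem filter_snoc_eq (S : List (String × String)) (p : String × String) :
    (S ++ [p]).filter (fun k => k.1 == p.1) = S.filter (fun k => k.1 == p.1) ++ [p] := by
  rw [List.filter_append]
  simp

-- appending one NEW pair to S is exactly one run of the shared update shape
-- (d1 = d, or d extended by an empty inner dict; then inner[p.2] = c)
theorem wfShape_snoc (S : List (String × String)) (v v' : String × String → Int)
    (p : String × String) (c : Int) (hp : p ∉ S)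
    (hv : ∀ k ∈ S, v' k = v k) (hc : v' p = c) :
    wfShape (S ++ [p]) v'
      = (let d := wfShape S v
         let d1 := if d.contains p.1 = false then d.insert p.1 PySem.Dict.empty else d
         d1.insert p.1 ((d1.getD p.1 PySem.Dict.empty).insert p.2 c)) := by
  show wfShape (S ++ [p]) v' = _
  by_cases hw : p.1 ∈ S.map Prod.fst
  · -- the word already has an entry: d1 = d, the pair is appended to its inner dict
    simp only [contains_shape, hw, decide_true, Bool.true_eq_false, if_false]
    rw [getD_shape S v hw]
    have hinner : (PySem.Dict.mk ((S.filter (fun k => k.1 == p.1)).map (fun k => (k.2, v k)))).insert p.2 c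
        = PySem.Dict.mk ((S.filter (fun k => k.1 == p.1)).map (fun k => (k.2, v k)) ++ [(p.2, c)]) := by
      apply PySem.Dict.ext
      rw [PySem.Dict.items_insert_of_not_contains]
      rw [contains_inner]
      simpa using fun h => hp (by simpa using h)
    rw [hinner]
    apply PySem.Dict.ext
    rw [PySem.Dict.items_insert_of_contains _ _ (by simp [contains_shape, hw])]
    unfold wfShape
    simp only [List.map_append, List.map_cons, List.map_nil]
    rw [ofList_snoc, if_pos hw]
    show List.map _ _ = List.map _ (List.map _ _)
    rw [map_entry_replace _ _
      (fun w' => PySem.Dict.mk (((S ++ [p]).filter (fun k => k.1 == w')).map (fun k => (k.2, v' k))))]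
    · intro w' _ hne
      rw [filter_snoc_ne S p w' (fun h => hne h.symm),
        filtermap_congr S v v' w' (fun k hk => hv k (List.mem_filter.mp hk).1)]
    · intro _
      rw [filter_snoc_eq, List.map_append,
        filtermap_congr S v v' p.1 (fun k hk => hv k (List.mem_filter.mp hk).1)]
      simp [hc]
  · -- new word: d1 = d extended with an empty inner dict, then inner[p.2] = c
    simp only [contains_shape, hw, decide_false, if_true]
    rw [PySem.Dict.getD_insert_self, empty_insert, PySem.Dict.insert_insert_self]
    apply PySem.Dict.ext
    rw [PySem.Dict.items_insert_of_not_contains _ _ (by simp [contains_shape, hw])]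
    unfold wfShape
    simp only [List.map_append, List.map_cons, List.map_nil]
    rw [ofList_snoc, if_neg hw, List.map_append]
    congr 1
    · apply List.map_congr_left
      intro w' hw'
      have hne : p.1 ≠ w' := by
        intro h
        exact hw (h ▸ (PySem.Set.mem_ofList _ _).mp hw')
      rw [filter_snoc_ne S p w' hne,
        filtermap_congr S v v' w' (fun k hk => hv k (List.mem_filter.mp hk).1)]
    · simp only [List.map_cons, List.map_nil]
      rw [filter_snoc_eq, filter_fst_nil S p.1 hw]
      simp [hc]

-- changing the value of one EXISTING pair of S is one insert into its inner dict
theorem wfShape_bump (S : List (String × String)) (v v' : String × String → Int)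
    (p : String × String) (c : Int) (hp : p ∈ S)
    (hv : ∀ k ∈ S, k ≠ p → v' k = v k) (hc : v' p = c) :
    wfShape S v'
      = (wfShape S v).insert p.1
          ((PySem.Dict.mk ((S.filter (fun k => k.1 == p.1)).map (fun k => (k.2, v k)))).insert p.2 c) := by
  have hw : p.1 ∈ S.map Prod.fst := List.mem_map.mpr ⟨p, hp, rfl⟩
  have hinner : (PySem.Dict.mk ((S.filter (fun k => k.1 == p.1)).map (fun k => (k.2, v k)))).insert p.2 c
      = PySem.Dict.mk ((S.filter (fun k => k.1 == p.1)).map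
          (fun k => if k.2 == p.2 then (p.2, c) else (k.2, v k))) := by
    apply PySem.Dict.ext
    rw [PySem.Dict.items_insert_of_contains _ _
      (by rw [contains_inner]; exact decide_eq_true (by simpa using hp))]
    show List.map _ (List.map _ _) = _
    rw [List.map_map]
    rfl
  rw [hinner]
  apply PySem.Dict.ext
  rw [PySem.Dict.items_insert_of_contains _ _ (by simp [contains_shape, hw])]
  unfold wfShape
  show List.map _ _ = List.map _ (List.map _ _)
  rw [map_entry_replace _ _
    (fun w' => PySem.Dict.mk ((S.filter (fun k => k.1 == w')).map (fun k => (k.2, v' k))))]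
  · intro w' _ hne
    apply congrArg PySem.Dict.mk
    apply (filtermap_congr S v v' w' _).symm
    intro k hk
    obtain ⟨hkS, hkw⟩ := List.mem_filter.mp hk
    refine hv k hkS (fun he => ?_)
    simp only [beq_iff_eq] at hkw
    exact hne (he ▸ hkw).symm
  · intro _
    apply congrArg PySem.Dict.mk
    apply List.map_congr_left
    intro k hk
    obtain ⟨hkS, hkw⟩ := List.mem_filter.mp hk
    simp only [beq_iff_eq] at hkw
    by_cases h2 : k.2 = p.2
    · have hkp : k = p := by
        obtain ⟨k1, k2⟩ := k; obtain ⟨p1, p2⟩ := p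
        simp_all
      subst hkp
      simp [hc]
    · simp [h2, hv k hkS (fun he => h2 (he ▸ rfl))]

theorem wfUpdateA_eq (d : PySem.Dict String (PySem.Dict String Int)) (w nw : String) :
    wfUpdateA d w nw = if okP (w, nw) then nIncr d (w, nw) else d := by
  unfold wfUpdateA nIncr okP
  by_cases h : w = "" ∨ nw = ""
  · have : ¬ (w ≠ "" ∧ nw ≠ "") := by tauto
    simp [h, this]
  · push Not at h
    simp [h.1, h.2]

theorem foldlA_filter (l : List (String × String)) (d : PySem.Dict String (PySem.Dict String Int)) :
    l.foldl (fun d q => wfUpdateA d q.1 q.2) d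
      = (l.filter (fun p => decide (p.1 ≠ "" ∧ p.2 ≠ ""))).foldl nIncr d := by
  induction l generalizing d with
  | nil => rfl
  | cons x t ih =>
    simp only [List.foldl_cons, List.filter_cons]
    rw [wfUpdateA_eq d x.1 x.2]
    by_cases h : okP x
    · simp only [okP] at h
      simp [okP, h, ih]
    · simp only [okP] at h
      simp [okP, h, ih]

theorem wfLoopA_eq (ws : List String) (d : PySem.Dict String (PySem.Dict String Int)) :
    wfLoopA d ws = (ws.zip ws.tail).foldl (fun d q => wfUpdateA d q.1 q.2) d := by
  induction ws generalizing d with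
  | nil => rfl
  | cons w t ih =>
    cases t with
    | nil => rfl
    | cons nw rest =>
      show wfLoopA (wfUpdateA d w nw) (nw :: rest) = _
      rw [ih]
      simp

theorem setdefault_eq_ite {κ ν : Type} [BEq κ] (d : PySem.Dict κ ν) (k : κ) (v : ν) :
    d.setdefault k v = if d.contains k = false then d.insert k v else d := by
  by_cases h : d.contains k = true
  · rw [PySem.Dict.setdefault_of_contains _ _ h, if_neg (by simp [h])]
  · have h' : d.contains k = false := by simpa using h
    rw [PySem.Dict.setdefault_of_not_contains _ _ h', if_pos h']

theorem count_snoc_self (qs : List (String × String)) (p : String × String) :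
    (qs ++ [p]).count p = qs.count p + 1 := by
  simp

theorem count_snoc_ne (qs : List (String × String)) {k p : String × String} (h : k ≠ p) :
    (qs ++ [p]).count k = qs.count k := by
  have h0 : List.count k [p] = 0 := by rw [List.count_eq_zero]; simp [h]
  rw [List.count_append, h0, Nat.add_zero]

-- one step of A's fused loop on the canonical dict
theorem stepA_canon (qs : List (String × String)) (p : String × String) :
    nIncr (wfCanon qs) p = wfCanon (qs ++ [p]) := by
  by_cases hp : p ∈ qs
  · -- the pair was seen before: its count is bumped in place
    have hpS : p ∈ PySem.Set.ofList qs := (PySem.Set.mem_ofList qs p).mpr hp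
    have hw : p.1 ∈ (PySem.Set.ofList qs).map Prod.fst := List.mem_map.mpr ⟨p, hpS, rfl⟩
    have hS : PySem.Set.ofList (qs ++ [p]) = PySem.Set.ofList qs := by
      rw [ofList_snoc, if_pos hp]
    simp only [nIncr, wfCanon, contains_shape, hw, decide_true, Bool.true_eq_false, if_false,
      getD_shape _ _ hw, contains_inner, Prod.mk.eta, hpS, getD_inner _ _ hpS (PySem.Set.nodup_ofList qs)]
    rw [hS]
    refine (wfShape_bump _ _ _ p ((qs.count p : Int) + 1) hpS ?_ ?_).symm
    · intro k _ hk
      rw [count_snoc_ne qs hk]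
    · rw [count_snoc_self]
      push_cast
      ring
  · -- a new pair is appended (to an existing or a fresh word entry)
    have hpS : p ∉ PySem.Set.ofList qs := fun h => hp ((PySem.Set.mem_ofList qs p).mp h)
    have hS : PySem.Set.ofList (qs ++ [p]) = PySem.Set.ofList qs ++ [p] := by
      rw [ofList_snoc, if_neg hp]
    have hcon : (((if (wfCanon qs).contains p.1 = false
          then (wfCanon qs).insert p.1 PySem.Dict.empty else wfCanon qs)).getD p.1
            PySem.Dict.empty).contains p.2 = false := by
      by_cases hw : p.1 ∈ (PySem.Set.ofList qs).map Prod.fst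
      · simp only [wfCanon, contains_shape, hw, decide_true, Bool.true_eq_false, if_false,
          getD_shape _ _ hw, contains_inner, Prod.mk.eta]
        simpa using hpS
      · simp only [wfCanon, contains_shape, hw, decide_false, if_true,
          PySem.Dict.getD_insert_self, PySem.Dict.contains_empty]
    simp only [nIncr, hcon, if_true]
    simp only [wfCanon]
    rw [hS]
    refine (wfShape_snoc _ _ _ p 1 hpS ?_ ?_).symm
    · intro k hk
      have : k ≠ p := fun he => hpS (he ▸ hk)
      rw [count_snoc_ne qs this]
    · have h0 : qs.count p = 0 := List.count_eq_zero.mpr hp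
      rw [count_snoc_self, h0]
      simp

-- A's fused loop computes the canonical dict
theorem loopA_canon (qs : List (String × String)) :
    qs.foldl nIncr PySem.Dict.empty = wfCanon qs := by
  induction qs using List.reverseRecOn with
  | nil => rfl
  | append_singleton qs p ih =>
    rw [List.foldl_append, List.foldl_cons, List.foldl_nil, ih, stepA_canon]

-- B's reshape pass over a distinct-pair/value list computes the canonical shape
theorem reshapeB_shape (S : List (String × String)) (v : String × String → Int)
    (hnd : S.Nodup) :
    wfReshapeB (S.map (fun k => (k, v k))) = wfShape S v := by
  induction S using List.reverseRecOn with
  | nil => rfl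
  | append_singleton S p ih =>
    have hnd' : S.Nodup := hnd.of_append_left
    have hp : p ∉ S := fun hmem =>
      (List.disjoint_of_nodup_append hnd) hmem (List.mem_singleton.mpr rfl)
    rw [List.map_append, List.map_cons, List.map_nil]
    unfold wfReshapeB
    rw [List.foldl_append, List.foldl_cons, List.foldl_nil]
    have hpre : (S.map (fun k => (k, v k))).foldl (fun d x =>
        let d1 := d.setdefault x.1.1 PySem.Dict.empty
        d1.insert x.1.1 ((d1.getD x.1.1 PySem.Dict.empty).insert x.1.2 x.2)) PySem.Dict.empty
          = wfShape S v := ih hnd'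
    rw [hpre]
    simp only []
    rw [setdefault_eq_ite]
    exact (wfShape_snoc S v v p (v p) hp (fun _ _ => rfl) rfl).symm

-- B's reshape of the flat counter computes the canonical dict
theorem reshapeB_canon (qs : List (String × String)) :
    wfReshapeB (wfCountsB qs).items = wfCanon qs := by
  have h : wfCountsB qs = PySem.Dict.counter qs :=
    PySem.Dict.foldl_insert_getD_add_one_eq_counter qs
  rw [h, PySem.Dict.items_counter,
    reshapeB_shape (PySem.Set.ofList qs) _ (PySem.Set.nodup_ofList qs)]
  rfl

-- ===== VERDICT (by name: the statement is the Claim_ definition above) =====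
theorem word_follower_spec : Claim_equal_word_follower := by
  intro s _
  show _ = _
  unfold word_follower word_follower_alt wfPairsB
  rw [PySem.List.slice_from_one, reshapeB_canon, wfLoopA_eq, foldlA_filter, loopA_canon]
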